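-- pv_equiv track=rewrite | github.com/soofjan1234/ins-robot | service/text_processing_service.py | _split_text_to_chunks
-- ===== SOURCE A (Python) =====
-- def _split_text_to_chunks(text, max_chunk_size=100):
--     """
--     将长文本分割成多个小块
--
--     Args:
--         text: 原始文本
--         max_chunk_size: 每个块的最大大小
--
--     Returns:
--         list: 文本块列表
--     """
--     if len(text) <= max_chunk_size:
--         return [text]
--
--     chunks = []
--     i = 0
--     while i < len(text):
--         # 尝试在空格处分割，避免截断单词
--         end = min(i + max_chunk_size, len(text))
--         if end < len(text):
--             # 寻找最后的空格或标点符号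
--             while end > i and text[end] not in (' ', '\n', '!', '.', ',', ';', ':', '?'):
--                 end -= 1
--
--             # 如果找不到合适的分割点，就直接在最大长度处分割
--             if end == i:
--                 end = i + max_chunk_size
--
--         chunks.append(text[i:end])
--         i = end
--
--     return chunks
-- ===== SOURCE B (Python) =====
-- _SEPS = (' ', '\n', '!', '.', ',', ';', ':', '?')
--
--
-- def _split_text_to_chunks(text, max_chunk_size=100):
--     """Chunk text at separator boundaries using a precomputed separator-index
--     list and a forward-moving pointer instead of a per-chunk backward scan."""
--     if len(text) <= max_chunk_size:
--         return [text]
--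
--     n = len(text)
--     seps = [j for j in range(n) if text[j] in _SEPS]
--     chunks = []
--     i = 0
--     p = 0
--     while i < n:
--         if i + max_chunk_size >= n:
--             end = n
--         else:
--             while p < len(seps) and seps[p] <= i:
--                 p += 1
--             q = p
--             while q < len(seps) and seps[q] <= i + max_chunk_size:
--                 q += 1
--             end = seps[q - 1] if q > p else i + max_chunk_size
--             p = q
--         chunks.append(text[i:end])
--         i = end
--     return chunks
-- ===== Notes on version B (the rewrite author's own statement) =====
-- stated objective: alternative
-- what changed: B precomputes the sorted list of all separator positions in one pass and walks it with a forward-moving pointer to pick each chunk's cut point, instead of A's per-chunk backward character scan over the window.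
import Mathlib
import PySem

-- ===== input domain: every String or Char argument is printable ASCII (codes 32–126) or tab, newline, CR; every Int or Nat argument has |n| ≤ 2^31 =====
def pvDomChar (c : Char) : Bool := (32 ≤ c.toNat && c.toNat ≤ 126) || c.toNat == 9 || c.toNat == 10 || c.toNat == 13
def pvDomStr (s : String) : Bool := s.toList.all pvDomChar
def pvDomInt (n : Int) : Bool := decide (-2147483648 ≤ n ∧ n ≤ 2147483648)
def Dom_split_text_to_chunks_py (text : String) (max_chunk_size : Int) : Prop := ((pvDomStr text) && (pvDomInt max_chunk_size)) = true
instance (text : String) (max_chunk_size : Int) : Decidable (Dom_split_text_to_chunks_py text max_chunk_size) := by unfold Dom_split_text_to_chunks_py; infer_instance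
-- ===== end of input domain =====

-- B replaces A's per-chunk backward scan for a separator by one precomputed sorted
-- list of separator positions traversed once with a forward pointer (objective: alternative).

-- ===== PORT A =====

-- membership test `text[end] in (' ', '\n', '!', '.', ',', ';', ':', '?')` (negated in A's loop)
def pvIsSep (c : Char) : Bool :=
  c = ' ' || c = '\n' || c = '!' || c = '.' || c = ',' || c = ';' || c = ':' || c = '?'

-- inner `while end > i and text[end] not in (...): end -= 1`; the getD default is never
-- read: the loop is only entered with e < cs.length (exact on the executed inputs)
def pvBackScan (cs : List Char) (i : Nat) (e : Nat) : Nat :=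
  if i < e then
    (if pvIsSep (cs.getD e ' ') then e else pvBackScan cs i (e - 1))
  else e
termination_by e
decreasing_by omega

-- one iteration's `end`: A's locals e0 (= min(i+max, len)) and e (the scan result)
-- are inlined (pure expressions, evaluated as the Python evaluates them)
def pvEndA (cs : List Char) (mx i : Nat) : Nat :=
  if min (i + mx) cs.length < cs.length then
    (if pvBackScan cs i (min (i + mx) cs.length) = i then i + mx
     else pvBackScan cs i (min (i + mx) cs.length))
  else min (i + mx) cs.length

-- outer `while i < len(text)` of A; fuel = cs.length suffices on every input A terminates on,
-- and both ports carry identical fuel so fuel never discriminates between them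
def pvLoopA (cs : List Char) (mx : Nat) : Nat → Nat → List String → List String
  | 0, _, acc => acc.reverse
  | fuel + 1, i, acc =>
    if i < cs.length then
      -- text[i:end] with 0 ≤ i ≤ end ≤ len: exact as drop/take
      pvLoopA cs mx fuel (pvEndA cs mx i) (String.ofList ((cs.drop i).take (pvEndA cs mx i - i)) :: acc)
    else acc.reverse

-- Pre_ guarantees max_chunk_size ≥ 1 whenever the loop runs, so .toNat is exact there
def split_text_to_chunks_py (text : String) (max_chunk_size : Int) : List String :=
  let cs := text.toList
  if (cs.length : Int) ≤ max_chunk_size then [text]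
  else pvLoopA cs max_chunk_size.toNat cs.length 0 []

-- ===== PORT B =====

-- one interior iteration of B: advance the pointer past positions ≤ i (dropWhile),
-- scan the window of positions ≤ i+max (takeWhile) and take its last element as `end`
-- (or i+max if empty); returns (end, remaining suffix past the window); B's locals
-- r1/win/rest are inlined (pure expressions)
def pvEndB (_cs : List Char) (mx i : Nat) (rem : List Nat) : Nat × List Nat :=
  ((match ((rem.dropWhile (fun j => decide (j ≤ i))).takeWhile
        (fun j => decide (j ≤ i + mx))).getLast? with
    | some p => p
    | none => i + mx),
   (rem.dropWhile (fun j => decide (j ≤ i))).dropWhile (fun j => decide (j ≤ i + mx)))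

-- B's `while i < n` loop; `rem` is the unconsumed suffix of the separator-position list
-- (the pointer p)
def pvLoopB (cs : List Char) (mx : Nat) : Nat → Nat → List Nat → List String → List String
  | 0, _, _, acc => acc.reverse
  | fuel + 1, i, rem, acc =>
    if i < cs.length then
      if cs.length ≤ i + mx then
        pvLoopB cs mx fuel cs.length rem (String.ofList ((cs.drop i).take (cs.length - i)) :: acc)
      else
        pvLoopB cs mx fuel (pvEndB cs mx i rem).1 (pvEndB cs mx i rem).2
          (String.ofList ((cs.drop i).take ((pvEndB cs mx i rem).1 - i)) :: acc)
    else acc.reverse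

def split_text_to_chunks_py_alt (text : String) (max_chunk_size : Int) : List String :=
  let cs := text.toList
  if (cs.length : Int) ≤ max_chunk_size then [text]
  else
    -- seps = [j for j in range(n) if text[j] in _SEPS]
    let seps := (List.range cs.length).filter (fun j => pvIsSep (cs.getD j ' '))
    pvLoopB cs max_chunk_size.toNat cs.length 0 seps []

-- ===== PRECONDITION & SPEC =====
-- Pre_ excludes exactly the inputs on which A never returns: for nonempty text with
-- max_chunk_size ≤ 0 A's while loop makes no progress and diverges.
def Pre_split_text_to_chunks_py (text : String) (max_chunk_size : Int) : Prop :=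
  1 ≤ max_chunk_size ∨ text = ""
instance (text : String) (max_chunk_size : Int) : Decidable (Pre_split_text_to_chunks_py text max_chunk_size) := by unfold Pre_split_text_to_chunks_py; infer_instance

def pvWitness_split_text_to_chunks_py : String × Int := ("hello world, again", 7)

def Spec_split_text_to_chunks_py (text : String) (max_chunk_size : Int) (out : List String) : Prop := out = split_text_to_chunks_py_alt text max_chunk_size
instance (text : String) (max_chunk_size : Int) (out : List String) : Decidable (Spec_split_text_to_chunks_py text max_chunk_size out) := by unfold Spec_split_text_to_chunks_py; infer_instance

-- ===== CLAIM (what is proved, stated in full; the proofs are below) =====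
def Claim_equal_split_text_to_chunks_py : Prop := ∀ (text : String) (max_chunk_size : Int), Dom_split_text_to_chunks_py text max_chunk_size → Pre_split_text_to_chunks_py text max_chunk_size → Spec_split_text_to_chunks_py text max_chunk_size (split_text_to_chunks_py text max_chunk_size)

-- ===== LEMMAS AND PROOFS =====

-- separator positions j with a < j ≤ b
def pvSepsIn (cs : List Char) (a b : Nat) : List Nat :=
  (List.range' (a + 1) (b - a)).filter (fun j => pvIsSep (cs.getD j ' '))

lemma pvSepsIn_mem {cs : List Char} {a b j : Nat} (h : j ∈ pvSepsIn cs a b) :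
    a < j ∧ j ≤ b := by
  unfold pvSepsIn at h
  rcases List.mem_filter.1 h with ⟨hr, _⟩
  rcases List.mem_range'.1 hr with ⟨k, hk, rfl⟩
  omega

lemma pvSepsIn_split {cs : List Char} {a b c : Nat} (h1 : a ≤ b) (h2 : b ≤ c) :
    pvSepsIn cs a c = pvSepsIn cs a b ++ pvSepsIn cs b c := by
  unfold pvSepsIn
  rw [← List.filter_append]
  congr 1
  have : b + 1 = (a + 1) + (b - a) := by omega
  rw [this, List.range'_append_1]
  congr 1
  omega

lemma pvTakeWhile_all {p : Nat → Bool} {l r : List Nat}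
    (hl : ∀ x ∈ l, p x = true) : (l ++ r).takeWhile p = l ++ r.takeWhile p := by
  induction l with
  | nil => simp
  | cons a t ih =>
    simp only [List.cons_append, List.takeWhile_cons, hl a (by simp)]
    simp [ih (fun x hx => hl x (by simp [hx]))]

lemma pvDropWhile_all {p : Nat → Bool} {l r : List Nat}
    (hl : ∀ x ∈ l, p x = true) : (l ++ r).dropWhile p = r.dropWhile p := by
  induction l with
  | nil => simp
  | cons a t ih =>
    simp only [List.cons_append, List.dropWhile_cons, hl a (by simp)]
    simp [ih (fun x hx => hl x (by simp [hx]))]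

lemma pvTakeWhile_none {p : Nat → Bool} {l : List Nat}
    (hl : ∀ x ∈ l, p x = false) : l.takeWhile p = [] := by
  cases l with
  | nil => simp
  | cons a t => simp [hl a (by simp)]

lemma pvDropWhile_none {p : Nat → Bool} {l : List Nat}
    (hl : ∀ x ∈ l, p x = false) : l.dropWhile p = l := by
  cases l with
  | nil => simp
  | cons a t => simp [hl a (by simp)]

-- A's backward scan finds the last separator position in (i, e], or returns i
lemma pvBackScan_eq (cs : List Char) (i : Nat) :
    ∀ k, pvBackScan cs i (i + k) = ((pvSepsIn cs i (i + k)).getLast?).getD i := by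
  intro k
  induction k with
  | zero =>
    unfold pvBackScan pvSepsIn
    simp
  | succ k ih =>
    have hsplit : pvSepsIn cs i (i + (k + 1))
        = pvSepsIn cs i (i + k) ++ pvSepsIn cs (i + k) (i + (k + 1)) := by
      exact pvSepsIn_split (by omega) (by omega)
    have hrange : pvSepsIn cs (i + k) (i + (k + 1))
        = if pvIsSep (cs.getD (i + k + 1) ' ') then [i + k + 1] else [] := by
      unfold pvSepsIn
      have : i + (k + 1) - (i + k) = 1 := by omega
      rw [this]
      simp [List.range', List.filter]
      split <;> simp_all
    unfold pvBackScan
    rw [if_pos (by omega)]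
    by_cases hs : pvIsSep (cs.getD (i + k + 1) ' ')
    · rw [if_pos (by simpa using hs)]
      rw [hsplit, hrange, if_pos hs]
      simp
      omega
    · rw [if_neg (by simpa using hs)]
      have : i + (k + 1) - 1 = i + k := by omega
      rw [this, ih, hsplit, hrange, if_neg hs]
      simp

-- the last element of pvSepsIn cs i b is > i when it exists
lemma pvGetLast?_mem_sepsIn {cs : List Char} {i b p : Nat}
    (h : (pvSepsIn cs i b).getLast? = some p) : i < p ∧ p ≤ b := by
  exact pvSepsIn_mem (List.mem_of_getLast? h)

-- ends agree: helper for the final-chunk case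
lemma pvEndA_big (cs : List Char) (mx i : Nat) (hbig : cs.length ≤ i + mx) :
    pvEndA cs mx i = cs.length := by
  unfold pvEndA
  rw [show min (i + mx) cs.length = cs.length from by omega]
  simp

-- core: the two loops agree when rem's unconsumed-suffix invariant holds
lemma pvLoop_eq (cs : List Char) (mx : Nat) :
    ∀ fuel i rem acc,
      rem.dropWhile (fun j => decide (j ≤ i)) = pvSepsIn cs i (cs.length - 1) →
      (∀ j ∈ rem, j < cs.length) →
      pvLoopA cs mx fuel i acc = pvLoopB cs mx fuel i rem acc := by
  intro fuel
  induction fuel with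
  | zero => intro i rem acc _ _; rfl
  | succ fuel ih =>
    intro i rem acc hinv hbnd
    unfold pvLoopA pvLoopB
    by_cases hi : i < cs.length
    · rw [if_pos hi, if_pos hi]
      by_cases hbig : cs.length ≤ i + mx
      · -- last chunk: both end at cs.length
        rw [if_pos hbig, pvEndA_big cs mx i hbig]
        apply ih
        · have hall : ∀ x ∈ rem, (decide (x ≤ cs.length)) = true := by
            intro x hx; have := hbnd x hx; simp; omega
          have hd : rem.dropWhile (fun j => decide (j ≤ cs.length)) = [] := by
            have h := pvDropWhile_all (r := ([] : List Nat)) hall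
            simpa using h
          rw [hd]
          unfold pvSepsIn
          rw [show cs.length - 1 - cs.length = 0 from by omega]
          simp
        · exact hbnd
      · -- interior chunk
        rw [if_neg hbig]
        have hsmall : i + mx < cs.length := by omega
        have hsplit : pvSepsIn cs i (cs.length - 1)
            = pvSepsIn cs i (i + mx) ++ pvSepsIn cs (i + mx) (cs.length - 1) :=
          pvSepsIn_split (by omega) (by omega)
        have hwinall : ∀ x ∈ pvSepsIn cs i (i + mx), (decide (x ≤ i + mx)) = true := by
          intro x hx; have := pvSepsIn_mem hx; simp; omega
        have hrestall : ∀ x ∈ pvSepsIn cs (i + mx) (cs.length - 1),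
            (decide (x ≤ i + mx)) = false := by
          intro x hx; have := pvSepsIn_mem hx; simp; omega
        have hwin : (rem.dropWhile (fun j => decide (j ≤ i))).takeWhile
              (fun j => decide (j ≤ i + mx)) = pvSepsIn cs i (i + mx) := by
          rw [hinv, hsplit, pvTakeWhile_all hwinall, pvTakeWhile_none hrestall]
          simp
        have hrest : (rem.dropWhile (fun j => decide (j ≤ i))).dropWhile
              (fun j => decide (j ≤ i + mx)) = pvSepsIn cs (i + mx) (cs.length - 1) := by
          rw [hinv, hsplit, pvDropWhile_all hwinall, pvDropWhile_none hrestall]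
        have hE2 : (pvEndB cs mx i rem).2 = pvSepsIn cs (i + mx) (cs.length - 1) := by
          unfold pvEndB
          exact hrest
        have hbnd' : ∀ j ∈ pvSepsIn cs (i + mx) (cs.length - 1), j < cs.length := by
          intro j hj; have := pvSepsIn_mem hj; omega
        cases hlast : (pvSepsIn cs i (i + mx)).getLast? with
        | none =>
          -- no separator in the window: both ends are i + mx
          have hEA : pvEndA cs mx i = i + mx := by
            unfold pvEndA
            rw [show min (i + mx) cs.length = i + mx from by omega, if_pos hsmall,
              pvBackScan_eq cs i mx, hlast]
            simp
          have hEB : (pvEndB cs mx i rem).1 = i + mx := by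
            unfold pvEndB
            simp only [hwin, hlast]
          rw [hEA, hEB, hE2]
          apply ih
          · exact pvDropWhile_none hrestall
          · exact hbnd'
        | some p =>
          have hp := pvGetLast?_mem_sepsIn hlast
          have hEA : pvEndA cs mx i = p := by
            unfold pvEndA
            rw [show min (i + mx) cs.length = i + mx from by omega, if_pos hsmall,
              pvBackScan_eq cs i mx, hlast]
            simp only [Option.getD_some]
            rw [if_neg (by omega)]
          have hEB : (pvEndB cs mx i rem).1 = p := by
            unfold pvEndB
            simp only [hwin, hlast]
          rw [hEA, hEB, hE2]
          apply ih
          · -- no separator lies in (p, i+mx], so pvSepsIn p (n-1) is exactly the rest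
            rw [pvDropWhile_none (fun x hx => by
              have := pvSepsIn_mem hx; simp; omega)]
            have h2 : pvSepsIn cs p (cs.length - 1)
                = pvSepsIn cs p (i + mx) ++ pvSepsIn cs (i + mx) (cs.length - 1) :=
              pvSepsIn_split (by omega) (by omega)
            have h3 : pvSepsIn cs p (i + mx) = [] := by
              by_contra hne
              have hx : ∃ q, q ∈ pvSepsIn cs p (i + mx) := by
                cases h : pvSepsIn cs p (i + mx) with
                | nil => exact absurd h hne
                | cons a t => exact ⟨a, List.mem_cons_self⟩
              rcases hx with ⟨q, hq⟩
              have hsp : pvSepsIn cs i (i + mx)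
                  = pvSepsIn cs i p ++ pvSepsIn cs p (i + mx) :=
                pvSepsIn_split (by omega) (by omega)
              have : (pvSepsIn cs i (i + mx)).getLast? = (pvSepsIn cs p (i + mx)).getLast? := by
                rw [hsp, List.getLast?_append_of_ne_nil _ hne]
              rw [hlast] at this
              have hqlast := List.mem_of_getLast? this.symm
              have := pvSepsIn_mem hqlast
              omega
            rw [h2, h3]
            simp
          · exact hbnd'
    · rw [if_neg hi, if_neg hi]

-- initial invariant: dropping positions ≤ 0 from the full separator list gives pvSepsIn 0
lemma pvInit_inv (cs : List Char) (hn : 0 < cs.length) :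
    ((List.range cs.length).filter (fun j => pvIsSep (cs.getD j ' '))).dropWhile
      (fun j => decide (j ≤ 0)) = pvSepsIn cs 0 (cs.length - 1) := by
  have h0 : List.range cs.length = List.range' 0 1 ++ List.range' 1 (cs.length - 1) := by
    rw [List.range_eq_range', List.range'_append_1]
    congr 1
    omega
  rw [h0, List.filter_append]
  have h1 : List.range' 0 1 = [0] := by simp [List.range']
  unfold pvSepsIn
  have h2 : ∀ x ∈ (List.range' 1 (cs.length - 1)).filter
      (fun j => pvIsSep (cs.getD j ' ')), (decide (x ≤ 0)) = false := by
    intro x hx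
    rcases List.mem_filter.1 hx with ⟨hr, _⟩
    rcases List.mem_range'.1 hr with ⟨k, hk, rfl⟩
    simp
  rw [h1]
  by_cases hs : pvIsSep (cs.getD 0 ' ')
  · simp only [List.filter, hs]
    rw [List.cons_append, List.dropWhile_cons]
    simp only [Nat.le_refl, decide_true, List.nil_append]
    rw [pvDropWhile_none h2]
    simp
  · simp only [List.filter, hs]
    simp only [List.nil_append]
    rw [pvDropWhile_none h2]
    simp

-- ===== VERDICT (by name: the statement is the Claim_ definition above) =====
theorem split_text_to_chunks_py_spec : Claim_equal_split_text_to_chunks_py := by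
  intro text m _hdom _hpre
  unfold Spec_split_text_to_chunks_py split_text_to_chunks_py split_text_to_chunks_py_alt
  by_cases h : ((text.toList.length : Int) ≤ m)
  · rw [if_pos h, if_pos h]
  · rw [if_neg h, if_neg h]
    by_cases hn : 0 < text.toList.length
    · exact pvLoop_eq text.toList m.toNat text.toList.length 0 _ []
        (pvInit_inv text.toList hn)
        (fun j hj => by
          rcases List.mem_filter.1 hj with ⟨hr, _⟩
          exact List.mem_range.1 hr)
    · -- empty text with negative m: zero fuel on both sides
      have h0 : text.toList.length = 0 := by omega
      rw [h0]
      rfl
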